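-- pv_equiv track=rewrite | github.com/nf-microbe/modules | modules/nf-core/mvirs/drs/resources/usr/bin/mvirs_drs.py | find_direct_repeat
-- ===== SOURCE A (Python) =====
-- def find_direct_repeat(seq, start, end, max_repeat=30):
--     """
--     Find the maximum direct repeat flanking a subsequence within a larger DNA sequence.
--
--     Args:
--         seq (str): The larger DNA sequence.
--         start (int): Start index of the subseq.
--         end (int): Start index of the subseq.
--
--     Returns:
--         int: The length of the maximum direct repeat.
--         str: The repeat sequence itself.
--     """
--
--     # Extract the flanks
--     left_flank = seq[:start]  # Left side of the subsequence
--     right_flank = seq[end:]  # Right side of the subsequence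
--
--     # Start with the largest possible repeat size and work down
--     for repeat_size in range(max_repeat, 0, -1):
--         # Make sure enough flanking sequence is present
--         if repeat_size > len(left_flank) or repeat_size > len(right_flank):
--             continue
--
--         # Get the potential repeat on both flanks
--         left_repeat = left_flank[-repeat_size:]
--         right_repeat = right_flank[:repeat_size]
--
--         # Check if the repeat is the same on both sides
--         if left_repeat == right_repeat:
--             return repeat_size, left_repeat
--
--     # If no repeat is found, return 0 and an empty string
--     return 0, ""
-- ===== SOURCE B (Python) =====
-- def find_direct_repeat(seq, start, end, max_repeat=30):
--     left = seq[:start]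
--     right = seq[end:]
--     m = min(max_repeat, len(left), len(right))
--     if m <= 0:
--         return 0, ""
--     # KMP overlap: longest k with left[-k:] == right[:k] is the longest border of
--     # s = right[:m] + sentinel + left[-m:]; the sentinel '\x00' never occurs in DNA text.
--     s = right[:m] + "\x00" + left[len(left) - m:]
--     pi = [0] * len(s)
--     for i in range(1, len(s)):
--         j = pi[i - 1]
--         while j and s[i] != s[j]:
--             j = pi[j - 1]
--         if s[i] == s[j]:
--             j += 1
--         pi[i] = j
--     L = pi[-1]
--     return L, right[:L]
-- ===== Notes on version B (the rewrite author's own statement) =====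
-- stated objective: faster
-- what changed: B replaces A's per-length slice-and-compare scan by the KMP prefix-function: it builds right[:m] + '\x00' + left[-m:] (m = min(max_repeat, flank lengths)) and reads the longest overlap off the final prefix-function entry, so no candidate length is ever tested by string comparison.
import Mathlib
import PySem

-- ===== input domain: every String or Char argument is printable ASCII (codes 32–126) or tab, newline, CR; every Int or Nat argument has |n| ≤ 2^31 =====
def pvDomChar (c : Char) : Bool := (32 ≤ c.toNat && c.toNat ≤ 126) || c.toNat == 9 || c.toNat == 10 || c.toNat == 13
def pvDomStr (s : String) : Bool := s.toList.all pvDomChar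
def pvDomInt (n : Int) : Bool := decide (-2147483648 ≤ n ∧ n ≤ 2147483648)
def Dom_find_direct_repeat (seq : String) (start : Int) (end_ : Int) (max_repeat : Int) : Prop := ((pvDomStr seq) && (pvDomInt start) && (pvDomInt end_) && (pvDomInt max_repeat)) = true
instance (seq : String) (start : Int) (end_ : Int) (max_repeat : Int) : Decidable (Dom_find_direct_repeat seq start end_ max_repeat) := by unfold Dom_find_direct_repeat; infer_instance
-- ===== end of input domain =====

-- B finds the repeat by a different algorithm: it builds right[:m] + '\x00' + left[-m:] and reads
-- the longest left/right overlap off the KMP prefix-function, instead of A's per-length comparisons.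


-- ===== PORT A =====
-- A's downward loop: for repeat_size in range(max_repeat, 0, -1), i.e. max_repeat.toNat
-- iterations with current value k (the Nat argument), skipping sizes longer than a flank.
def fdrLoopA (left right : List Char) : Nat → Int × String
  | 0 => (0, "")
  | k + 1 =>
    let rs : Int := (k : Int) + 1
    if rs > (left.length : Int) ∨ rs > (right.length : Int) then
      fdrLoopA left right k
    else
      let lrep := PySem.List.slice left (some (-rs)) none
      let rrep := PySem.List.slice right none (some rs)
      if lrep = rrep then (rs, String.ofList lrep) else fdrLoopA left right k

def find_direct_repeat (seq : String) (start : Int) (end_ : Int) (max_repeat : Int) : Int × String :=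
  let left := PySem.List.slice seq.toList none (some start)
  let right := PySem.List.slice seq.toList (some end_) none
  fdrLoopA left right max_repeat.toNat

-- ===== PORT B =====
-- Source B's sentinel "\x00"
def pvSentinel : Char := Char.ofNat 0

-- the inner 'while j and s[i] != s[j]: j = pi[j-1]' (c = s[i]); fuel bounds the strictly
-- decreasing j (fuel = initial j suffices), guard only — it never alters the computed value
def kmpFall (s : List Char) (pi : List Nat) (c : Char) : Nat → Nat → Nat
  | 0, j => j
  | fuel + 1, j =>
    if j ≠ 0 ∧ s.getD j pvSentinel ≠ c then kmpFall s pi c fuel (pi.getD (j - 1) 0) else j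

-- one body of 'for i in range(1, len(s))' (i = i0 + 1), appending pi[i]
def kmpStep (s : List Char) (pi : List Nat) (i0 : Nat) : List Nat :=
  let i := i0 + 1
  let c := s.getD i pvSentinel
  let j1 := kmpFall s pi c (pi.getD (i - 1) 0) (pi.getD (i - 1) 0)
  let j2 := if c = s.getD j1 pvSentinel then j1 + 1 else j1
  pi ++ [j2]

-- the prefix-function array of s (s nonempty where used; pi[0] = 0)
def kmpBuild (s : List Char) : List Nat :=
  (List.range (s.length - 1)).foldl (kmpStep s) [0]

def find_direct_repeat_alt (seq : String) (start : Int) (end_ : Int) (max_repeat : Int) : Int × String :=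
  let left := PySem.List.slice seq.toList none (some start)
  let right := PySem.List.slice seq.toList (some end_) none
  let m : Int := min max_repeat (min (left.length : Int) (right.length : Int))
  if m ≤ 0 then (0, "")
  else
    let s := PySem.List.slice right none (some m) ++
      pvSentinel :: PySem.List.slice left (some ((left.length : Int) - m)) none
    let pi := kmpBuild s
    let L := pi.getD (pi.length - 1) 0   -- pi[-1]; pi is nonempty here
    ((L : Int), String.ofList (right.take L))

-- ===== PRECONDITION & SPEC =====
def Spec_find_direct_repeat (seq : String) (start : Int) (end_ : Int) (max_repeat : Int) (out : Int × String) : Prop := out = find_direct_repeat_alt seq start end_ max_repeat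
instance (seq : String) (start : Int) (end_ : Int) (max_repeat : Int) (out : Int × String) : Decidable (Spec_find_direct_repeat seq start end_ max_repeat out) := by unfold Spec_find_direct_repeat; infer_instance

-- ===== CLAIM (what is proved, stated in full; the proofs are below) =====
def Claim_equal_find_direct_repeat : Prop := ∀ (seq : String) (start : Int) (end_ : Int) (max_repeat : Int), Dom_find_direct_repeat seq start end_ max_repeat → Spec_find_direct_repeat seq start end_ max_repeat (find_direct_repeat seq start end_ max_repeat)

-- ===== LEMMAS AND PROOFS =====

-- the largest k ≤ n with left[len-k:] = right[:k], else 0 (reference value for both programs)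
def bestUp (left right : List Char) : Nat → Nat
  | 0 => 0
  | n + 1 =>
    if left.drop (left.length - (n + 1)) = right.take (n + 1) then n + 1
    else bestUp left right n

theorem bestUp_le (left right : List Char) (n : Nat) : bestUp left right n ≤ n := by
  induction n with
  | zero => simp [bestUp]
  | succ k ih => rw [bestUp]; split_ifs <;> omega

theorem bestUp_cond (left right : List Char) (n : Nat) :
    left.drop (left.length - bestUp left right n) = right.take (bestUp left right n) := by
  induction n with
  | zero => simp [bestUp]
  | succ k ih =>
    rw [bestUp]
    split_ifs with h
    · exact h
    · exact ih

theorem bestUp_max (left right : List Char) (n k : Nat) (hk : k ≤ n)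
    (hc : left.drop (left.length - k) = right.take k) : k ≤ bestUp left right n := by
  induction n with
  | zero => omega
  | succ j ih =>
    rw [bestUp]
    split_ifs with h
    · omega
    · rcases Nat.lt_or_ge k (j + 1) with h' | h'
      · exact ih (by omega)
      · have hkj : k = j + 1 := by omega
        subst hkj
        exact absurd hc h

theorem fdrLoopA_eq_bestUp (left right : List Char) (n : Nat)
    (h : n ≤ min left.length right.length) :
    fdrLoopA left right n
      = ((bestUp left right n : Int), String.ofList (right.take (bestUp left right n))) := by
  induction n with
  | zero => simp [fdrLoopA, bestUp]
  | succ k ih =>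
    have hl : k + 1 ≤ left.length := by omega
    have hr : k + 1 ≤ right.length := by omega
    rw [fdrLoopA]
    have hguard : ¬ ((k : Int) + 1 > (left.length : Int) ∨ (k : Int) + 1 > (right.length : Int)) := by
      rw [not_or]; constructor <;> simp <;> omega
    rw [if_neg hguard]
    rw [show ((k : Int) + 1) = (((k + 1 : Nat) : Int)) by push_cast; ring]
    rw [show -(((k + 1 : Nat) : Int)) = -(((k + 1 : Nat) : Int)) from rfl,
      PySem.List.slice_from_neg_natCast left (k + 1) (by omega),
      PySem.List.slice_to right (Int.natCast_nonneg (k + 1)), Int.toNat_natCast]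
    by_cases hc : left.drop (left.length - (k + 1)) = right.take (k + 1)
    · rw [if_pos hc, bestUp, if_pos hc, hc]
    · rw [if_neg hc, bestUp, if_neg hc]
      exact ih (by omega)

theorem fdrLoopA_skip (left right : List Char) (d : Nat) :
    fdrLoopA left right (min left.length right.length + d)
      = fdrLoopA left right (min left.length right.length) := by
  induction d with
  | zero => rfl
  | succ k ih =>
    have : min left.length right.length + (k + 1) = (min left.length right.length + k) + 1 := by
      omega
    rw [this, fdrLoopA, if_pos, ih]
    rcases Nat.le_total left.length right.length with h | h
    · left
      have : min left.length right.length = left.length := by omega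
      push_cast [this]; omega
    · right
      have : min left.length right.length = right.length := by omega
      push_cast [this]; omega

theorem fdrLoopA_eq (left right : List Char) (n : Nat) :
    fdrLoopA left right n
      = ((bestUp left right (min n (min left.length right.length)) : Int),
          String.ofList (right.take (bestUp left right (min n (min left.length right.length))))) := by
  rcases Nat.le_total n (min left.length right.length) with h | h
  · rw [Nat.min_eq_left h]; exact fdrLoopA_eq_bestUp left right n h
  · have : n = min left.length right.length + (n - min left.length right.length) := by omega
    rw [Nat.min_eq_right h, this, fdrLoopA_skip]
    exact fdrLoopA_eq_bestUp left right _ (le_refl _)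

-- j is a border of the length-n prefix of s (index formulation; getD default is irrelevant
-- on the ranges used)
def Brd (s : List Char) (n j : Nat) : Prop :=
  j ≤ n ∧ ∀ x, x < j → s.getD x pvSentinel = s.getD (n - j + x) pvSentinel

theorem brd_zero (s : List Char) (n : Nat) : Brd s n 0 :=
  ⟨Nat.zero_le n, fun x hx => absurd hx (by omega)⟩

theorem brd_ext (s : List Char) (i j : Nat) (h : j ≤ i) :
    Brd s (i + 1) (j + 1) ↔ Brd s i j ∧ s.getD j pvSentinel = s.getD i pvSentinel := by
  constructor
  · rintro ⟨h1, h2⟩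
    refine ⟨⟨h, fun x hx => ?_⟩, ?_⟩
    · have := h2 x (by omega)
      rwa [show i + 1 - (j + 1) + x = i - j + x by omega] at this
    · have := h2 j (by omega)
      rwa [show i + 1 - (j + 1) + j = i by omega] at this
  · rintro ⟨⟨h1, h2⟩, h3⟩
    refine ⟨by omega, fun x hx => ?_⟩
    rcases Nat.lt_or_ge x j with hxj | hxj
    · have := h2 x hxj
      rwa [show i + 1 - (j + 1) + x = i - j + x by omega]
    · have hxeq : x = j := by omega
      subst hxeq
      rwa [show i + 1 - (x + 1) + x = i by omega]

theorem brd_nest (s : List Char) (n j j' : Nat) (hb : Brd s n j) (hle : j' ≤ j) :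
    Brd s n j' ↔ Brd s j j' := by
  obtain ⟨hjn, hj⟩ := hb
  constructor
  · rintro ⟨h1, h2⟩
    refine ⟨hle, fun x hx => ?_⟩
    have e1 := h2 x hx
    have e2 := hj (j - j' + x) (by omega)
    rw [show n - j + (j - j' + x) = n - j' + x by omega] at e2
    rw [e1, ← e2]
  · rintro ⟨h1, h2⟩
    refine ⟨by omega, fun x hx => ?_⟩
    have e1 := h2 x hx
    have e2 := hj (j - j' + x) (by omega)
    rw [show n - j + (j - j' + x) = n - j' + x by omega] at e2
    rw [e1, e2]

-- invariant of the prefix-function array: entry t is the longest proper border of s.take (t+1)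
def GoodPi (s : List Char) (pi : List Nat) : Prop :=
  ∀ t, t < pi.length →
    Brd s (t + 1) (pi.getD t 0) ∧ pi.getD t 0 ≤ t ∧
      ∀ j, j ≤ t → Brd s (t + 1) j → j ≤ pi.getD t 0

theorem kmpFall_spec (s : List Char) (pi : List Nat) (c : Char) (hg : GoodPi s pi) :
    ∀ fuel j, j ≤ fuel → j < pi.length → Brd s pi.length j →
      (∀ j', j' < pi.length → Brd s pi.length j' → s.getD j' pvSentinel = c → j' ≤ j) →
      Brd s pi.length (kmpFall s pi c fuel j) ∧ kmpFall s pi c fuel j < pi.length ∧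
        (kmpFall s pi c fuel j = 0 ∨ s.getD (kmpFall s pi c fuel j) pvSentinel = c) ∧
        (∀ j', j' < pi.length → Brd s pi.length j' → s.getD j' pvSentinel = c →
          j' ≤ kmpFall s pi c fuel j) := by
  intro fuel
  induction fuel with
  | zero =>
    intro j hf hlt hb hmax
    have hj0 : j = 0 := by omega
    subst hj0
    exact ⟨hb, hlt, Or.inl rfl, hmax⟩
  | succ f ih =>
    intro j hf hlt hb hmax
    rw [kmpFall]
    by_cases hcond : j ≠ 0 ∧ s.getD j pvSentinel ≠ c
    · rw [if_pos hcond]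
      obtain ⟨hj0, hne⟩ := hcond
      have hjm1 : j - 1 < pi.length := by omega
      obtain ⟨hb', hle', hmax'⟩ := hg (j - 1) hjm1
      rw [show j - 1 + 1 = j by omega] at hb' hmax'
      -- next candidate j2 = pi[j-1], the longest proper border of s.take j
      set j2 := pi.getD (j - 1) 0 with hj2
      have hj2lt : j2 < j := by omega
      have hb2 : Brd s pi.length j2 := (brd_nest s pi.length j j2 hb (by omega)).2 hb'
      refine ih j2 (by omega) (by omega) hb2 ?_
      intro j' hj' hbj' hcj'
      have hj'j : j' ≤ j := hmax j' hj' hbj' hcj'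
      have hj'lt : j' < j := by
        rcases Nat.lt_or_ge j' j with h | h
        · exact h
        · exfalso; exact hne (by rw [show j = j' by omega]; exact hcj')
      exact hmax' j' (by omega) ((brd_nest s pi.length j j' hb (by omega)).1 hbj')
    · rw [if_neg hcond]
      refine ⟨hb, hlt, ?_, hmax⟩
      by_cases hz : j = 0
      · exact Or.inl hz
      · right
        by_contra hne
        exact hcond ⟨hz, hne⟩

theorem goodPi_step (s : List Char) (pi : List Nat) (hg : GoodPi s pi)
    (i0 : Nat) (hi0 : i0 + 1 = pi.length) :
    GoodPi s (kmpStep s pi i0) ∧ (kmpStep s pi i0).length = pi.length + 1 := by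
  simp only [kmpStep, Nat.add_sub_cancel]
  obtain ⟨hb0, hle0, hmax0⟩ := hg i0 (by omega)
  rw [hi0] at hb0 hmax0
  set c := s.getD (i0 + 1) pvSentinel with hc
  rw [hi0] at hc
  have hpre : ∀ j', j' < pi.length → Brd s pi.length j' → s.getD j' pvSentinel = c →
      j' ≤ pi.getD i0 0 := fun j' hj' hbj' _ => hmax0 j' (by omega) hbj'
  obtain ⟨hbr, hrlt, hror, hrmax⟩ :=
    kmpFall_spec s pi c hg (pi.getD i0 0) (pi.getD i0 0) le_rfl (by omega) hb0 hpre
  set r := kmpFall s pi c (pi.getD i0 0) (pi.getD i0 0) with hr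
  set j2 := if c = s.getD r pvSentinel then r + 1 else r with hj2
  have hnew : Brd s (pi.length + 1) j2 ∧ j2 ≤ pi.length ∧
      ∀ j, j ≤ pi.length → Brd s (pi.length + 1) j → j ≤ j2 := by
    by_cases hcr : c = s.getD r pvSentinel
    · rw [hj2, if_pos hcr]
      refine ⟨(brd_ext s pi.length r (by omega)).2 ⟨hbr, by rw [← hcr, hc]⟩, by omega, ?_⟩
      intro j hj hbj
      rcases j with _ | jj
      · omega
      · have hx := (brd_ext s pi.length jj (by omega)).1 hbj
        have hjj := hrmax jj (by omega) hx.1 (by rw [hx.2, ← hc])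
        omega
    · rw [hj2, if_neg hcr]
      have hr0 : r = 0 := by
        rcases hror with h | h
        · exact h
        · exact absurd h.symm hcr
      refine ⟨by rw [hr0]; exact brd_zero s (pi.length + 1), by omega, ?_⟩
      intro j hj hbj
      rcases j with _ | jj
      · omega
      · exfalso
        have hx := (brd_ext s pi.length jj (by omega)).1 hbj
        have hjj := hrmax jj (by omega) hx.1 (by rw [hx.2, ← hc])
        have hjj0 : jj = 0 := by omega
        subst hjj0
        apply hcr
        rw [hc, hr0, ← hx.2]
  refine ⟨?_, by simp⟩
  intro t ht
  simp only [List.length_append, List.length_cons, List.length_nil] at ht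
  rcases Nat.lt_or_ge t pi.length with htl | htl
  · obtain ⟨a1, a2, a3⟩ := hg t htl
    rw [List.getD_append _ _ _ _ htl]
    exact ⟨a1, a2, a3⟩
  · have hteq : t = pi.length := by omega
    subst hteq
    have hgd : (pi ++ [j2]).getD pi.length 0 = j2 := by
      rw [List.getD_eq_getElem _ _ (by simp)]
      simp
    rw [hgd]
    exact ⟨hnew.1, hnew.2.1, hnew.2.2⟩

theorem kmpBuild_aux (s : List Char) (k : Nat) (hk : k ≤ s.length - 1) :
    ((List.range k).foldl (kmpStep s) [0]).length = k + 1 ∧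
      GoodPi s ((List.range k).foldl (kmpStep s) [0]) := by
  induction k with
  | zero =>
    refine ⟨by simp, ?_⟩
    intro t ht
    simp only [List.range_zero, List.foldl_nil, List.length_cons, List.length_nil] at *
    have : t = 0 := by omega
    subst this
    refine ⟨brd_zero s 1, le_rfl, fun j hj _ => by omega⟩
  | succ k ih =>
    obtain ⟨hl, hg⟩ := ih (by omega)
    rw [List.range_succ, List.foldl_append, List.foldl_cons, List.foldl_nil]
    obtain ⟨hg', hl'⟩ := goodPi_step s _ hg k (by omega)
    exact ⟨by omega, hg'⟩

theorem kmpBuild_spec (s : List Char) (hs : 1 ≤ s.length) :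
    (kmpBuild s).length = s.length ∧ GoodPi s (kmpBuild s) := by
  unfold kmpBuild
  have := kmpBuild_aux s (s.length - 1) le_rfl
  rw [show s.length - 1 + 1 = s.length by omega] at this
  exact this

-- getD through the sentinel concatenation
theorem getD_sent_left (u t : List Char) (x : Nat) (hx : x < u.length) :
    (u ++ pvSentinel :: t).getD x pvSentinel = u.getD x pvSentinel := by
  rw [List.getD_append _ _ _ _ hx]

theorem getD_sent_mid (u t : List Char) :
    (u ++ pvSentinel :: t).getD u.length pvSentinel = pvSentinel := by
  rw [List.getD_eq_getElem _ _ (by simp only [List.length_append, List.length_cons]; omega)]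
  simp

theorem getD_sent_right (u t : List Char) (y : Nat) :
    (u ++ pvSentinel :: t).getD (u.length + 1 + y) pvSentinel = t.getD y pvSentinel := by
  rcases Nat.lt_or_ge y t.length with hy | hy
  · rw [List.getD_eq_getElem _ _ (by simp only [List.length_append, List.length_cons]; omega),
      List.getD_eq_getElem _ _ hy]
    rw [List.getElem_append_right (by omega)]
    simp [show u.length + 1 + y - u.length = y + 1 by omega]
  · rw [List.getD_eq_default _ _ (by simp only [List.length_append, List.length_cons]; omega),
      List.getD_eq_default _ _ (by omega)]

-- borders of u ++ [sentinel] ++ t are overlaps of u and t, when the sentinel is fresh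
theorem brd_sent (u t : List Char) (m : Nat) (hu : u.length = m) (htl : t.length = m)
    (ht : ∀ y, y < m → t.getD y pvSentinel ≠ pvSentinel) (j : Nat) (hj : j ≤ 2 * m) :
    Brd (u ++ pvSentinel :: t) (2 * m + 1) j ↔
      j ≤ m ∧ ∀ x, x < j → u.getD x pvSentinel = t.getD (m - j + x) pvSentinel := by
  subst hu
  set m := u.length with hm
  constructor
  · rintro ⟨h1, h2⟩
    have hjm : j ≤ m := by
      by_contra hgt
      have hmj : m < j := by omega
      have := h2 m (by omega)
      rw [show 2 * m + 1 - j + m = m + 1 + (2 * m - j) by omega] at this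
      rw [getD_sent_mid, getD_sent_right] at this
      exact ht (2 * m - j) (by omega) this.symm
    refine ⟨hjm, fun x hx => ?_⟩
    have := h2 x hx
    rw [show 2 * m + 1 - j + x = m + 1 + (m - j + x) by omega] at this
    rw [getD_sent_left u t x (by omega), getD_sent_right] at this
    exact this
  · rintro ⟨hjm, h⟩
    refine ⟨by omega, fun x hx => ?_⟩
    rw [show 2 * m + 1 - j + x = m + 1 + (m - j + x) by omega,
      getD_sent_left u t x (by omega), getD_sent_right]
    exact h x hx

-- the pointwise form of 'left[len-k:] == right[:k]'
theorem cond_iff_pt (L R : List Char) (k : Nat) (hkL : k ≤ L.length) (hkR : k ≤ R.length) :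
    (L.drop (L.length - k) = R.take k ↔
      ∀ x, x < k → R.getD x pvSentinel = L.getD (L.length - k + x) pvSentinel) := by
  constructor
  · intro h x hx
    have hx1 : x < (L.drop (L.length - k)).length := by simp; omega
    have hx2 : x < (R.take k).length := by simp; omega
    have := congrArg (fun l => l.getD x pvSentinel) h
    simp only at this
    rw [List.getD_eq_getElem _ _ hx1, List.getD_eq_getElem _ _ hx2] at this
    rw [List.getElem_drop, List.getElem_take] at this
    rw [List.getD_eq_getElem _ _ (by omega), List.getD_eq_getElem _ _ (by omega)]
    exact this.symm
  · intro h
    apply List.ext_getElem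
    · simp; omega
    · intro x h1 h2
      rw [List.getElem_drop, List.getElem_take]
      have := h x (by simp at h2; omega)
      rw [List.getD_eq_getElem _ _ (by simp at h2; omega),
        List.getD_eq_getElem _ _ (by simp at h1; omega)] at this
      exact this.symm

-- u/t entries are R/L entries
theorem getD_take_eq (R : List Char) (mn x : Nat) (hx : x < mn) (hm : mn ≤ R.length) :
    (R.take mn).getD x pvSentinel = R.getD x pvSentinel := by
  rw [List.getD_eq_getElem _ _ (by simp; omega), List.getD_eq_getElem _ _ (by omega),
    List.getElem_take]

theorem getD_drop_eq (L : List Char) (mn y : Nat) (hy : y < mn) (hm : mn ≤ L.length) :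
    (L.drop (L.length - mn)).getD y pvSentinel = L.getD (L.length - mn + y) pvSentinel := by
  rw [List.getD_eq_getElem _ _ (by simp; omega), List.getD_eq_getElem _ _ (by omega),
    List.getElem_drop]

-- the value B reads off the prefix function equals bestUp (the value A computes)
theorem kmp_value (L R : List Char) (mn : Nat) (h1 : 1 ≤ mn) (hmL : mn ≤ L.length)
    (hmR : mn ≤ R.length)
    (hsent : ∀ c ∈ L, c ≠ pvSentinel) :
    (kmpBuild (R.take mn ++ pvSentinel :: L.drop (L.length - mn))).getD
      ((kmpBuild (R.take mn ++ pvSentinel :: L.drop (L.length - mn))).length - 1) 0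
      = bestUp L R mn := by
  set u := R.take mn with hu
  set t := L.drop (L.length - mn) with htd
  have hul : u.length = mn := by simp [hu]; omega
  have htl : t.length = mn := by simp [htd]; omega
  set s := u ++ pvSentinel :: t with hs
  have hsl : s.length = 2 * mn + 1 := by simp [hs]; omega
  have hslen : 1 ≤ s.length := by omega
  obtain ⟨hplen, hg⟩ := kmpBuild_spec s hslen
  set pi := kmpBuild s with hpi
  have htfresh : ∀ y, y < mn → t.getD y pvSentinel ≠ pvSentinel := by
    intro y hy
    rw [List.getD_eq_getElem _ _ (by omega)]
    exact hsent _ (List.mem_of_mem_drop (List.getElem_mem _))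
  -- the last entry of pi
  obtain ⟨hbL, hleL, hmaxL⟩ := hg (s.length - 1) (by omega)
  rw [show s.length - 1 + 1 = s.length by omega] at hbL hmaxL
  set Lv := pi.getD (s.length - 1) 0 with hLv
  rw [hplen]
  show Lv = bestUp L R mn
  -- Lv is an overlap
  have hLv2m : Lv ≤ 2 * mn := by omega
  rw [hsl] at hbL
  obtain ⟨hLvm, hLpt⟩ := (brd_sent u t mn hul htl htfresh Lv hLv2m).1 hbL
  have hcondL : L.drop (L.length - Lv) = R.take Lv := by
    rw [cond_iff_pt L R Lv (by omega) (by omega)]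
    intro x hx
    have := hLpt x hx
    rw [hu, getD_take_eq R mn x (by omega) hmR] at this
    rw [htd, getD_drop_eq L mn (mn - Lv + x) (by omega) hmL] at this
    rw [show L.length - mn + (mn - Lv + x) = L.length - Lv + x by omega] at this
    exact this
  -- every overlap is at most Lv
  have hge : bestUp L R mn ≤ Lv := by
    set b := bestUp L R mn with hb
    have hbm : b ≤ mn := bestUp_le L R mn
    have hbc := bestUp_cond L R mn
    rw [← hb] at hbc
    have hbrd : Brd s s.length b := by
      rw [hsl]
      rw [brd_sent u t mn hul htl htfresh b (by omega)]
      refine ⟨hbm, fun x hx => ?_⟩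
      rw [hu, getD_take_eq R mn x (by omega) hmR,
        htd, getD_drop_eq L mn (mn - b + x) (by omega) hmL,
        show L.length - mn + (mn - b + x) = L.length - b + x by omega]
      have := (cond_iff_pt L R b (by omega) (by omega)).1 hbc x hx
      exact this
    exact hmaxL b (by omega) hbrd
  have hle : Lv ≤ bestUp L R mn := bestUp_max L R mn Lv (by omega) hcondL
  omega

-- ===== VERDICT (by name: the statement is the Claim_ definition above) =====
theorem find_direct_repeat_spec : Claim_equal_find_direct_repeat := by
  intro seq start end_ max_repeat hdom
  unfold Spec_find_direct_repeat find_direct_repeat find_direct_repeat_alt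
  set L := PySem.List.slice seq.toList none (some start) with hL
  set R := PySem.List.slice seq.toList (some end_) none with hR
  simp only
  rw [fdrLoopA_eq L R max_repeat.toNat]
  set m : Int := min max_repeat (min (L.length : Int) (R.length : Int)) with hm
  by_cases hm0 : m ≤ 0
  · rw [if_pos hm0]
    have hK : min max_repeat.toNat (min L.length R.length) = 0 := by
      simp only [hm] at hm0
      omega
    rw [hK]
    simp [bestUp]
  · rw [if_neg hm0]
    have hm1 : 1 ≤ m := by omega
    have hmL : m ≤ (L.length : Int) := by simp only [hm]; omega
    have hmR : m ≤ (R.length : Int) := by simp only [hm]; omega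
    set mn := m.toNat with hmn
    have hmn1 : 1 ≤ mn := by omega
    have hmnL : mn ≤ L.length := by omega
    have hmnR : mn ≤ R.length := by omega
    have hK : min max_repeat.toNat (min L.length R.length) = mn := by
      simp only [hm] at *
      omega
    rw [hK]
    -- the slices in B are take/drop
    have hsliceU : PySem.List.slice R none (some m) = R.take mn := by
      rw [PySem.List.slice_to R (by omega)]
    have hsliceT : PySem.List.slice L (some ((L.length : Int) - m)) none
        = L.drop (L.length - mn) := by
      rw [PySem.List.slice_from L (by omega)]
      congr 1
      omega
    rw [hsliceU, hsliceT]
    -- sentinel freshness from the domain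
    have hdomseq : pvDomStr seq = true := by
      unfold Dom_find_direct_repeat at hdom
      simp only [Bool.and_eq_true] at hdom
      exact hdom.1.1.1
    have hfresh : ∀ c ∈ seq.toList, c ≠ pvSentinel := by
      intro c hc hceq
      have := (List.all_eq_true.mp hdomseq) c hc
      rw [hceq] at this
      simp [pvDomChar, pvSentinel] at this
    have hfreshL : ∀ c ∈ L, c ≠ pvSentinel := by
      intro c hc
      rw [hL] at hc
      exact hfresh c (PySem.List.mem_of_mem_slice _ _ _ hc)
    rw [kmp_value L R mn hmn1 hmnL hmnR hfreshL]
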